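-- pv_equiv track=rewrite | github.com/cse-kiet/PCSE25-53 | aggregation_search/final_app.py | get_purpose
-- ===== SOURCE A (Python) =====
-- def get_purpose(place):
--     types = place.get("types", [])
--     if any(t in types for t in ["restaurant", "cafe", "bakery", "meal_takeaway"]):
--         return "Eating"
--     elif any(t in types for t in ["museum", "tourist_attraction"]):
--         return "Sightseeing"
--     elif "park" in types:
--         return "Recreation"
--     elif "shopping_mall" in types:
--         return "Shopping"
--     elif "lodging" in types:
--         return "Stay"
--     else:
--         return "Visit"
-- ===== SOURCE B (Python) =====
-- _RANK = {
--     "restaurant": (0, "Eating"),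
--     "cafe": (0, "Eating"),
--     "bakery": (0, "Eating"),
--     "meal_takeaway": (0, "Eating"),
--     "museum": (1, "Sightseeing"),
--     "tourist_attraction": (1, "Sightseeing"),
--     "park": (2, "Recreation"),
--     "shopping_mall": (3, "Shopping"),
--     "lodging": (4, "Stay"),
-- }
--
-- def get_purpose(place):
--     best = (5, "Visit")
--     for t in place.get("types", []):
--         r = _RANK.get(t)
--         if r is not None and r[0] < best[0]:
--             best = r
--     return best[1]
-- ===== Notes on version B (the rewrite author's own statement) =====
-- stated objective: alternative
-- what changed: Instead of testing each category's keyword list against the types list in a fixed if-chain (repeated membership scans), B makes one pass over the types list with a precomputed type->(rank,label) table and keeps the minimum-rank label seen, defaulting to 'Visit'.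
import Mathlib
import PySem

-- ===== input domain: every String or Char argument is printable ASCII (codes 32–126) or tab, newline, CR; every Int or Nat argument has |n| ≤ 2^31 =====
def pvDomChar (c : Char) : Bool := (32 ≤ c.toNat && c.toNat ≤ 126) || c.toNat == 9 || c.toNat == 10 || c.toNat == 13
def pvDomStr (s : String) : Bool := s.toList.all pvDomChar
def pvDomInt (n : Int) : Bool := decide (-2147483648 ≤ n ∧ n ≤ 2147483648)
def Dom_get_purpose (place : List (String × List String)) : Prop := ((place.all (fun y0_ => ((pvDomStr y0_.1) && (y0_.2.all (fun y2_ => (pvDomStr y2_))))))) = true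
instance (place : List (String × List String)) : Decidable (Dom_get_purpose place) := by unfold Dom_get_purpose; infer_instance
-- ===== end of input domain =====

-- B replaces A's fixed if-chain of membership scans by one pass over the types
-- list against a type->(rank,label) table, keeping the minimum rank seen (objective: alternative).

-- ===== PORT A =====
def get_purpose (place : List (String × List String)) : String :=
  let types := (PySem.Dict.mk place).getD "types" []
  if ["restaurant", "cafe", "bakery", "meal_takeaway"].any (fun t => types.contains t) then "Eating"
  else if ["museum", "tourist_attraction"].any (fun t => types.contains t) then "Sightseeing"
  else if types.contains "park" then "Recreation"
  else if types.contains "shopping_mall" then "Shopping"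
  else if types.contains "lodging" then "Stay"
  else "Visit"

-- ===== PORT B =====
-- the module-level _RANK dict of Source B
def pvRankTable : PySem.Dict String (Int × String) :=
  PySem.Dict.mk
    [("restaurant", (0, "Eating")), ("cafe", (0, "Eating")), ("bakery", (0, "Eating")),
     ("meal_takeaway", (0, "Eating")), ("museum", (1, "Sightseeing")),
     ("tourist_attraction", (1, "Sightseeing")), ("park", (2, "Recreation")),
     ("shopping_mall", (3, "Shopping")), ("lodging", (4, "Stay"))]

def get_purpose_alt (place : List (String × List String)) : String :=
  let types := (PySem.Dict.mk place).getD "types" []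
  (types.foldl
    (fun best t =>
      match pvRankTable.get? t with
      | some r => if r.1 < best.1 then r else best
      | none => best)
    ((5 : Int), "Visit")).2

-- ===== PRECONDITION & SPEC =====
def Spec_get_purpose (place : List (String × List String)) (out : String) : Prop := out = get_purpose_alt place
instance (place : List (String × List String)) (out : String) : Decidable (Spec_get_purpose place out) := by unfold Spec_get_purpose; infer_instance

-- ===== CLAIM (what is proved, stated in full; the proofs are below) =====
def Claim_equal_get_purpose : Prop := ∀ (place : List (String × List String)), Dom_get_purpose place → Spec_get_purpose place (get_purpose place)

-- ===== LEMMAS AND PROOFS =====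

-- rank of a single type string (5 = not in the table)
def pvRk (t : String) : Int :=
  if t = "restaurant" ∨ t = "cafe" ∨ t = "bakery" ∨ t = "meal_takeaway" then 0
  else if t = "museum" ∨ t = "tourist_attraction" then 1
  else if t = "park" then 2
  else if t = "shopping_mall" then 3
  else if t = "lodging" then 4
  else 5

-- label of a rank
def pvLb (k : Int) : String :=
  if k = 0 then "Eating" else if k = 1 then "Sightseeing" else if k = 2 then "Recreation"
  else if k = 3 then "Shopping" else if k = 4 then "Stay" else "Visit"

-- minimum rank occurring in a list of types
def pvMrk : List String → Int
  | [] => 5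
  | t :: r => min (pvRk t) (pvMrk r)

lemma pvRk_bounds (t : String) : 0 ≤ pvRk t ∧ pvRk t ≤ 5 := by
  unfold pvRk; split_ifs <;> norm_num

lemma pvMrk_bounds (ts : List String) : 0 ≤ pvMrk ts ∧ pvMrk ts ≤ 5 := by
  induction ts with
  | nil => simp [pvMrk]
  | cons t r ih => have := pvRk_bounds t; simp only [pvMrk]; omega

lemma pvRk_eq_zero_iff (t : String) :
    pvRk t = 0 ↔ (t = "restaurant" ∨ t = "cafe" ∨ t = "bakery" ∨ t = "meal_takeaway") := by
  unfold pvRk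
  split_ifs <;> simp_all

lemma pvRk_eq_one_iff (t : String) :
    pvRk t = 1 ↔ (t = "museum" ∨ t = "tourist_attraction") := by
  unfold pvRk
  split_ifs <;> try simp_all
  all_goals
    try first
      | (rintro rfl; simp_all)
      | (constructor <;> rintro rfl <;> simp_all)

lemma pvRk_eq_two_iff (t : String) : pvRk t = 2 ↔ t = "park" := by
  unfold pvRk
  split_ifs <;> try simp_all
  all_goals
    try first
      | (rintro rfl; simp_all)
      | (constructor <;> rintro rfl <;> simp_all)

lemma pvRk_eq_three_iff (t : String) : pvRk t = 3 ↔ t = "shopping_mall" := by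
  unfold pvRk
  split_ifs <;> try simp_all
  all_goals
    try first
      | (rintro rfl; simp_all)
      | (constructor <;> rintro rfl <;> simp_all)

lemma pvRk_eq_four_iff (t : String) : pvRk t = 4 ↔ t = "lodging" := by
  unfold pvRk
  split_ifs <;> try simp_all
  all_goals
    try first
      | (rintro rfl; simp_all)
      | (constructor <;> rintro rfl <;> simp_all)

lemma pvMrk_le_of_mem {t : String} {ts : List String} (h : t ∈ ts) : pvMrk ts ≤ pvRk t := by
  induction ts with
  | nil => cases h
  | cons x r ih =>
    rcases List.mem_cons.mp h with h | h
    · subst h; simp only [pvMrk]; omega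
    · have := ih h; simp only [pvMrk]; omega

lemma le_pvMrk {c : Int} {ts : List String} (h : ∀ t ∈ ts, c ≤ pvRk t) (hc : c ≤ 5) :
    c ≤ pvMrk ts := by
  induction ts with
  | nil => simpa [pvMrk] using hc
  | cons x r ih =>
    have h1 := h x (List.mem_cons_self)
    have h2 := ih (fun t ht => h t (List.mem_cons_of_mem _ ht))
    simp only [pvMrk]; omega

-- A's if-chain on a types list equals the label of the minimum rank present.
lemma chain_eq (ts : List String) :
    (if ["restaurant", "cafe", "bakery", "meal_takeaway"].any (fun t => ts.contains t) then "Eating"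
     else if ["museum", "tourist_attraction"].any (fun t => ts.contains t) then "Sightseeing"
     else if ts.contains "park" then "Recreation"
     else if ts.contains "shopping_mall" then "Shopping"
     else if ts.contains "lodging" then "Stay"
     else "Visit") = pvLb (pvMrk ts) := by
  simp only [List.any_cons, List.any_nil, Bool.or_eq_true, Bool.false_eq_true, or_false,
    List.contains_iff_mem]
  split_ifs with h0 h1 h2 h3 h4
  · -- some rank-0 type present
    have hle : pvMrk ts ≤ 0 := by
      rcases h0 with h | h | h | h <;>
        · have := pvMrk_le_of_mem h
          simp only [pvRk] at this
          norm_num at this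
          omega
    have := pvMrk_bounds ts
    have : pvMrk ts = 0 := by omega
    simp [this, pvLb]
  · have hle : pvMrk ts ≤ 1 := by
      rcases h1 with h | h <;>
        · have := pvMrk_le_of_mem h
          simp only [pvRk] at this
          norm_num at this
          omega
    have hge : (1 : Int) ≤ pvMrk ts := by
      refine le_pvMrk (fun t ht => ?_) (by norm_num)
      have hb := pvRk_bounds t
      have hne0 : pvRk t ≠ 0 := by
        intro e; rcases (pvRk_eq_zero_iff t).mp e with rfl | rfl | rfl | rfl <;> tauto
      omega
    have : pvMrk ts = 1 := by omega
    simp [this, pvLb]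
  · have hle : pvMrk ts ≤ 2 := by
      have := pvMrk_le_of_mem h2
      simp only [pvRk] at this
      norm_num at this
      omega
    have hge : (2 : Int) ≤ pvMrk ts := by
      refine le_pvMrk (fun t ht => ?_) (by norm_num)
      have hb := pvRk_bounds t
      have hne0 : pvRk t ≠ 0 := by
        intro e; rcases (pvRk_eq_zero_iff t).mp e with rfl | rfl | rfl | rfl <;> tauto
      have hne1 : pvRk t ≠ 1 := by
        intro e; rcases (pvRk_eq_one_iff t).mp e with rfl | rfl <;> tauto
      omega
    have : pvMrk ts = 2 := by omega
    simp [this, pvLb]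
  · have hle : pvMrk ts ≤ 3 := by
      have := pvMrk_le_of_mem h3
      simp only [pvRk] at this
      norm_num at this
      omega
    have hge : (3 : Int) ≤ pvMrk ts := by
      refine le_pvMrk (fun t ht => ?_) (by norm_num)
      have hb := pvRk_bounds t
      have hne0 : pvRk t ≠ 0 := by
        intro e; rcases (pvRk_eq_zero_iff t).mp e with rfl | rfl | rfl | rfl <;> tauto
      have hne1 : pvRk t ≠ 1 := by
        intro e; rcases (pvRk_eq_one_iff t).mp e with rfl | rfl <;> tauto
      have hne2 : pvRk t ≠ 2 := by
        intro e; rw [pvRk_eq_two_iff] at e; subst e; tauto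
      omega
    have : pvMrk ts = 3 := by omega
    simp [this, pvLb]
  · have hle : pvMrk ts ≤ 4 := by
      have := pvMrk_le_of_mem h4
      simp only [pvRk] at this
      norm_num at this
      omega
    have hge : (4 : Int) ≤ pvMrk ts := by
      refine le_pvMrk (fun t ht => ?_) (by norm_num)
      have hb := pvRk_bounds t
      have hne0 : pvRk t ≠ 0 := by
        intro e; rcases (pvRk_eq_zero_iff t).mp e with rfl | rfl | rfl | rfl <;> tauto
      have hne1 : pvRk t ≠ 1 := by
        intro e; rcases (pvRk_eq_one_iff t).mp e with rfl | rfl <;> tauto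
      have hne2 : pvRk t ≠ 2 := by
        intro e; rw [pvRk_eq_two_iff] at e; subst e; tauto
      have hne3 : pvRk t ≠ 3 := by
        intro e; rw [pvRk_eq_three_iff] at e; subst e; tauto
      omega
    have : pvMrk ts = 4 := by omega
    simp [this, pvLb]
  · have hge : (5 : Int) ≤ pvMrk ts := by
      refine le_pvMrk (fun t ht => ?_) (by norm_num)
      have hb := pvRk_bounds t
      have hne0 : pvRk t ≠ 0 := by
        intro e; rcases (pvRk_eq_zero_iff t).mp e with rfl | rfl | rfl | rfl <;> tauto
      have hne1 : pvRk t ≠ 1 := by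
        intro e; rcases (pvRk_eq_one_iff t).mp e with rfl | rfl <;> tauto
      have hne2 : pvRk t ≠ 2 := by
        intro e; rw [pvRk_eq_two_iff] at e; subst e; tauto
      have hne3 : pvRk t ≠ 3 := by
        intro e; rw [pvRk_eq_three_iff] at e; subst e; tauto
      have hne4 : pvRk t ≠ 4 := by
        intro e; rw [pvRk_eq_four_iff] at e; subst e; tauto
      omega
    have hb := pvMrk_bounds ts
    have : pvMrk ts = 5 := by omega
    simp [this, pvLb]

-- the _RANK lookup in terms of pvRk/pvLb
lemma table_get (t : String) :
    pvRankTable.get? t = if pvRk t = 5 then none else some (pvRk t, pvLb (pvRk t)) := by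
  rcases eq_or_ne t "restaurant" with rfl | h1
  · decide
  rcases eq_or_ne t "cafe" with rfl | h2
  · decide
  rcases eq_or_ne t "bakery" with rfl | h3
  · decide
  rcases eq_or_ne t "meal_takeaway" with rfl | h4
  · decide
  rcases eq_or_ne t "museum" with rfl | h5
  · decide
  rcases eq_or_ne t "tourist_attraction" with rfl | h6
  · decide
  rcases eq_or_ne t "park" with rfl | h7
  · decide
  rcases eq_or_ne t "shopping_mall" with rfl | h8
  · decide
  rcases eq_or_ne t "lodging" with rfl | h9
  · decide
  have hrk : pvRk t = 5 := by
    unfold pvRk; simp [h1, h2, h3, h4, h5, h6, h7, h8, h9]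
  rw [hrk]
  simp [pvRankTable, PySem.Dict.get?, h1.symm, h2.symm, h3.symm,
    h4.symm, h5.symm, h6.symm, h7.symm, h8.symm, h9.symm]

-- B's fold computes (min rank, its label), starting from any (k, pvLb k) with 0 ≤ k ≤ 5.
lemma loop_lemma (ts : List String) : ∀ k : Int, 0 ≤ k → k ≤ 5 →
    ts.foldl
      (fun best t =>
        match pvRankTable.get? t with
        | some r => if r.1 < best.1 then r else best
        | none => best)
      (k, pvLb k)
    = (min k (pvMrk ts), pvLb (min k (pvMrk ts))) := by
  induction ts with
  | nil =>
    intro k h0 h5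
    have hm : min k (pvMrk []) = k := by simp only [pvMrk]; omega
    simp [hm]
  | cons t r ih =>
    intro k h0 h5
    have hb := pvRk_bounds t
    have hstep : (match pvRankTable.get? t with
        | some r => if r.1 < ((k : Int), pvLb k).1 then r else ((k : Int), pvLb k)
        | none => ((k : Int), pvLb k))
        = (min (pvRk t) k, pvLb (min (pvRk t) k)) := by
      rw [table_get t]
      by_cases h : pvRk t = 5
      · have hm5 : min (5 : Int) k = k := by omega
        rw [h, if_pos rfl, hm5]
      · by_cases hlt : pvRk t < k
        · have hm : min (pvRk t) k = pvRk t := by omega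
          simp [h, hlt, hm]
        · have hm : min (pvRk t) k = k := by omega
          simp [h, hlt, hm]
    rw [List.foldl_cons, hstep, ih (min (pvRk t) k) (by omega) (by omega)]
    have hm : min (min (pvRk t) k) (pvMrk r) = min k (pvMrk (t :: r)) := by
      simp only [pvMrk]; omega
    rw [hm]

-- ===== VERDICT (by name: the statement is the Claim_ definition above) =====
theorem get_purpose_spec : Claim_equal_get_purpose := by
  intro place _
  unfold Spec_get_purpose get_purpose get_purpose_alt
  simp only []
  generalize (PySem.Dict.mk place).getD "types" [] = ts
  have hinit : (((5 : Int), "Visit") : Int × String) = ((5 : Int), pvLb 5) := rfl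
  rw [hinit, loop_lemma ts 5 (by norm_num) (by norm_num)]
  have hm : min (5 : Int) (pvMrk ts) = pvMrk ts := by
    have := pvMrk_bounds ts; omega
  rw [hm]
  exact chain_eq ts
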